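-- pv_equiv track=rewrite | github.com/noahsolomon0518/Midi-Parser | midi_parser/one_hot_encoder.py | occurences
-- ===== SOURCE A (Python) =====
-- def occurences(sequences):
--     nOccur = {}
--     for sequence in sequences:
--         for val in sequence:
--             if(not val in nOccur.keys()):
--                 nOccur[val] = 0
--             nOccur[val] = nOccur[val]+1
--     return sorted(nOccur.items())
-- ===== SOURCE B (Python) =====
-- def occurences(sequences):
--     flat = sorted(v for seq in sequences for v in seq)
--     out = []
--     prev = None
--     run = 0
--     for v in flat:
--         if prev is not None and v == prev:
--             run += 1
--         else:
--             if prev is not None: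
--                 out.append((prev, run))
--             prev = v
--             run = 1
--     if prev is not None:
--         out.append((prev, run))
--     return out
-- ===== Notes on version B (the rewrite author's own statement) =====
-- stated objective: alternative
-- what changed: Replaces the dictionary counting pass plus final sort of items by concatenating all values, sorting them once, and emitting (value, run-length) pairs in a single linear scan that tracks the previous value; no dictionary is maintained.
import Mathlib
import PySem

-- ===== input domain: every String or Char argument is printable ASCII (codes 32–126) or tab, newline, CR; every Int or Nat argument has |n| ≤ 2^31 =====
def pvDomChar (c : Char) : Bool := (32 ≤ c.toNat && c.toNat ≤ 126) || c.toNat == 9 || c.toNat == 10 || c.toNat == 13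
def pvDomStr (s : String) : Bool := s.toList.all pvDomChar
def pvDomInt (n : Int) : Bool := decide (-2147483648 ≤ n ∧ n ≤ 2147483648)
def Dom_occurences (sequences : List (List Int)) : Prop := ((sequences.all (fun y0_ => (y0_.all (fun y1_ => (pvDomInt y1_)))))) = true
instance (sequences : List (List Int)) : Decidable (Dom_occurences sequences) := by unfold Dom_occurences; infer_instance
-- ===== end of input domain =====

-- B replaces A's dict-counting-then-sort by sort-all-values-then-run-length-scan (alternative algorithm, not claimed faster).

-- ===== PORT A =====
def occurences (sequences : List (List Int)) : List (Int × Int) :=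
  let nOccur : PySem.Dict Int Int :=
    sequences.foldl (fun d sequence =>
      sequence.foldl (fun d val =>
        let d' := if ¬ (d.contains val = true) then d.insert val 0 else d
        d'.insert val (d'.getD val 0 + 1)) d) PySem.Dict.empty
  PySem.List.sorted2 nOccur.items (fun p => p.1) (fun p => p.2) false

-- ===== PORT B =====
-- one step of Source B's loop: state = (out, prev, run)
def occAltStep (st : List (Int × Int) × Option Int × Int) (v : Int) :
    List (Int × Int) × Option Int × Int :=
  match st with
  | (out, some p, run) =>
      if v = p then (out, some p, run + 1) else (out ++ [(p, run)], some v, 1)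
  | (out, none, _) => (out, some v, 1)

def occurences_alt (sequences : List (List Int)) : List (Int × Int) :=
  let flat := PySem.List.sorted (sequences.flatMap (fun seq => seq)) (fun v => v) false
  match flat.foldl occAltStep ([], none, 0) with
  | (out, some p, run) => out ++ [(p, run)]
  | (out, none, _) => out

-- ===== PRECONDITION & SPEC =====
def Spec_occurences (sequences : List (List Int)) (out : List (Int × Int)) : Prop := out = occurences_alt sequences
instance (sequences : List (List Int)) (out : List (Int × Int)) : Decidable (Spec_occurences sequences out) := by unfold Spec_occurences; infer_instance

-- ===== CLAIM (what is proved, stated in full; the proofs are below) =====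
def Claim_equal_occurences : Prop := ∀ (sequences : List (List Int)), Dom_occurences sequences → Spec_occurences sequences (occurences sequences)

-- ===== LEMMAS AND PROOFS =====

-- the canonical value both programs compute: distinct values in increasing order, with multiplicities
def occCanon (flat : List Int) : List (Int × Int) :=
  (PySem.List.sorted (PySem.Set.ofList flat) (fun x => x) false).map
    (fun k => (k, (flat.count k : Int)))

-- pure recursion equivalent to Source B's loop body once prev is set
def runsAux (p : Int) (run : Int) : List Int → List (Int × Int)
  | [] => [(p, run)]
  | x :: xs => if x = p then runsAux p (run + 1) xs else (p, run) :: runsAux x 1 xs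

lemma occAlt_fold_eq_runsAux (xs : List Int) (out : List (Int × Int)) (p run) :
    (match xs.foldl occAltStep (out, some p, run) with
      | (out, some q, r) => out ++ [(q, r)]
      | (out, none, _) => out) = out ++ runsAux p run xs := by
  induction xs generalizing out p run with
  | nil => simp [runsAux]
  | cons x xs ih =>
      by_cases h : x = p <;>
        simp [occAltStep, h, runsAux, ih, List.append_assoc]

lemma occAlt_run (m : Int) (t : List Int) :
    (match (m :: t).foldl occAltStep ([], none, 0) with
      | (out, some q, r) => out ++ [(q, r)]
      | (out, none, _) => out) = runsAux m 1 t := by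
  exact (occAlt_fold_eq_runsAux t [] m 1).trans (List.nil_append _)

lemma runsAux_fst_le (p : Int) (run : Int) (xs : List Int)
    (hall : ∀ x ∈ xs, p ≤ x) (hs : xs.Pairwise (· ≤ ·)) :
    ∀ q ∈ runsAux p run xs, p ≤ q.1 := by
  induction xs generalizing p run with
  | nil => simp [runsAux]
  | cons x t ih =>
      intro q hq
      rcases List.pairwise_cons.mp hs with ⟨hxt, hts⟩
      by_cases h : x = p
      · rw [runsAux, if_pos h] at hq
        exact ih p (run + 1) (fun y hy => hall y (List.mem_cons_of_mem _ hy)) hts q hq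
      · rw [runsAux, if_neg h] at hq
        rcases List.mem_cons.mp hq with hq | hq
        · subst hq; exact le_refl _
        · exact le_trans (hall x List.mem_cons_self) (ih x 1 hxt hts q hq)

lemma runsAux_pairwise (p : Int) (run : Int) (xs : List Int)
    (hall : ∀ x ∈ xs, p ≤ x) (hs : xs.Pairwise (· ≤ ·)) :
    (runsAux p run xs).Pairwise (fun a b => a.1 < b.1) := by
  induction xs generalizing p run with
  | nil => simp [runsAux]
  | cons x t ih =>
      rcases List.pairwise_cons.mp hs with ⟨hxt, hts⟩
      by_cases h : x = p
      · rw [runsAux, if_pos h]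
        exact ih p (run + 1) (fun y hy => hall y (List.mem_cons_of_mem _ hy)) hts
      · rw [runsAux, if_neg h]
        have hpx : p < x := lt_of_le_of_ne (hall x List.mem_cons_self) (fun e => h e.symm)
        refine List.pairwise_cons.mpr ⟨?_, ih x 1 hxt hts⟩
        intro q hq
        exact lt_of_lt_of_le hpx (runsAux_fst_le x 1 t hxt hts q hq)

lemma runsAux_mem (p : Int) (run : Int) (xs : List Int)
    (hall : ∀ x ∈ xs, p ≤ x) (hs : xs.Pairwise (· ≤ ·)) (v c : Int) :
    ((v, c) ∈ runsAux p run xs) ↔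
      (v = p ∧ c = run + (xs.count p : Int)) ∨ (p < v ∧ v ∈ xs ∧ c = (xs.count v : Int)) := by
  induction xs generalizing p run with
  | nil => simp [runsAux]
  | cons x t ih =>
      rcases List.pairwise_cons.mp hs with ⟨hxt, hts⟩
      by_cases h : x = p
      · subst h
        rw [runsAux, if_pos rfl,
          ih x (run + 1) (fun y hy => le_trans (hall x List.mem_cons_self) (hxt y hy)) hts]
        constructor
        · rintro (⟨rfl, rfl⟩ | ⟨hv, hvt, rfl⟩)
          · left
            refine ⟨rfl, ?_⟩
            simp [List.count_cons]
            push_cast; ring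
          · right
            have hvx : (v == x) = false := by simp [ne_of_gt hv]
            refine ⟨hv, List.mem_cons_of_mem _ hvt, by simp [List.count_cons, hvx] <;> omega⟩
        · rintro (⟨rfl, rfl⟩ | ⟨hv, hvm, rfl⟩)
          · left
            refine ⟨rfl, ?_⟩
            simp [List.count_cons]
            push_cast; ring
          · right
            have hvx : (v == x) = false := by simp [ne_of_gt hv]
            rcases List.mem_cons.mp hvm with he | hvt
            · exact absurd he (by simpa using ne_of_gt hv)
            · exact ⟨hv, hvt, by simp [List.count_cons, hvx] <;> omega⟩
      · have hpx : p < x := lt_of_le_of_ne (hall x List.mem_cons_self) (fun e => h e.symm)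
        have hpnot : p ∉ x :: t := by
          intro hmem
          rcases List.mem_cons.mp hmem with he | hmem
          · exact h he.symm
          · exact absurd (hxt p hmem) (not_le.mpr hpx)
        rw [runsAux, if_neg h]
        rw [List.mem_cons, ih x 1 hxt hts]
        constructor
        · rintro (he | ⟨rfl, rfl⟩ | ⟨hv, hvt, rfl⟩)
          · left
            have : v = p ∧ c = run := by
              have := Prod.mk.injEq v c p run ▸ he
              exact ⟨congrArg Prod.fst he, congrArg Prod.snd he⟩
            refine ⟨this.1, ?_⟩
            rw [List.count_eq_zero.mpr hpnot]
            simpa using this.2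
          · right
            refine ⟨hpx, List.mem_cons_self, ?_⟩
            simp [List.count_cons]
            push_cast; ring
          · right
            have hvx : (v == x) = false := by simp [ne_of_gt hv]
            exact ⟨lt_trans hpx hv, List.mem_cons_of_mem _ hvt, by simp [List.count_cons, hvx] <;> omega⟩
        · rintro (⟨rfl, rfl⟩ | ⟨hv, hvm, rfl⟩)
          · left
            rw [List.count_eq_zero.mpr hpnot]
            simp
          · rcases List.mem_cons.mp hvm with rfl | hvt
            · right; left
              refine ⟨rfl, ?_⟩
              simp [List.count_cons]
              push_cast; ring
            · have hxv : x ≤ v := hxt v hvt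
              rcases eq_or_lt_of_le hxv with rfl | hlt
              · right; left
                refine ⟨rfl, ?_⟩
                simp [List.count_cons]
                push_cast; ring
              · right; right
                have hvx : (v == x) = false := by simp [ne_of_gt hlt]
                exact ⟨hlt, hvt, by simp [List.count_cons, hvx] <;> omega⟩

-- occCanon is strictly increasing in the first component, and its members are exactly (v, count v)
lemma occCanon_pairwise (flat : List Int) :
    (occCanon flat).Pairwise (fun a b => a.1 < b.1) := by
  exact List.Pairwise.map _ (fun a b h => h) (PySem.List.sorted_ofList_pairwise_lt flat)

lemma occCanon_mem (flat : List Int) (v c : Int) :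
    ((v, c) ∈ occCanon flat) ↔ v ∈ flat ∧ c = (flat.count v : Int) := by
  unfold occCanon
  simp only [List.mem_map, PySem.List.mem_sorted, PySem.Set.mem_ofList]
  constructor
  · rintro ⟨k, hk, he⟩
    have h1 : v = k := congrArg Prod.fst he.symm
    subst h1
    exact ⟨hk, (congrArg Prod.snd he.symm)⟩
  · rintro ⟨hv, rfl⟩
    exact ⟨v, hv, rfl⟩

-- Source B computes occCanon of the flattened input
lemma occ_B_eq_canon (sequences : List (List Int)) :
    occurences_alt sequences = occCanon (sequences.flatMap (fun seq => seq)) := by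
  unfold occurences_alt
  have hperm := PySem.List.sorted_perm (sequences.flatMap (fun seq => seq)) (fun v => v) false
  cases hsrt : PySem.List.sorted (sequences.flatMap (fun seq => seq)) (fun v => v) false with
  | nil =>
      rw [hsrt] at hperm
      have hflat : sequences.flatMap (fun seq => seq) = [] := List.perm_nil.mp hperm.symm
      rw [hflat]
      rfl
  | cons m t =>
      rw [hsrt] at hperm
      have hsorted := PySem.List.sorted_pairwise (sequences.flatMap (fun seq => seq)) (fun v => v)
      rw [hsrt] at hsorted
      rcases List.pairwise_cons.mp hsorted with ⟨hmt, hts⟩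
      refine (occAlt_run m t).trans ?_
      -- both sides strictly increasing in fst with the same members ⇒ equal
      have hp1 : (runsAux m 1 t).Pairwise (fun (a b : Int × Int) => a.1 < b.1) :=
        runsAux_pairwise m 1 t hmt hts
      have hp2 := occCanon_pairwise (sequences.flatMap (fun seq => seq))
      have hmem : ∀ q : Int × Int,
          q ∈ runsAux m 1 t ↔ q ∈ occCanon (sequences.flatMap (fun seq => seq)) := by
        rintro ⟨v, c⟩
        rw [runsAux_mem m 1 t hmt hts v c, occCanon_mem]
        have hcnt : ∀ w : Int, (sequences.flatMap (fun seq => seq)).count w = (m :: t).count w :=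
          fun w => (hperm.count_eq w).symm
        have hmemf : ∀ w : Int, w ∈ sequences.flatMap (fun seq => seq) ↔ w ∈ m :: t :=
          fun w => hperm.symm.mem_iff
        constructor
        · rintro (⟨rfl, rfl⟩ | ⟨hv, hvt, rfl⟩)
          · refine ⟨(hmemf v).mpr List.mem_cons_self, ?_⟩
            rw [hcnt]
            simp [List.count_cons] <;> omega
          · have hvm : (v == m) = false := by simp [ne_of_gt hv]
            refine ⟨(hmemf v).mpr (List.mem_cons_of_mem _ hvt), ?_⟩
            rw [hcnt]
            simp [List.count_cons, hvm] <;> omega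
        · rintro ⟨hvf, rfl⟩
          rcases List.mem_cons.mp ((hmemf v).mp hvf) with rfl | hvt
          · left
            refine ⟨rfl, ?_⟩
            rw [hcnt]
            simp [List.count_cons] <;> omega
          · rcases eq_or_lt_of_le (hmt v hvt) with rfl | hlt
            · left
              refine ⟨rfl, ?_⟩
              rw [hcnt]
              simp [List.count_cons] <;> omega
            · right
              have hvm : (v == m) = false := by simp [ne_of_gt hlt]
              refine ⟨hlt, hvt, ?_⟩
              rw [hcnt]
              simp [List.count_cons, hvm] <;> omega
      have hnd1 : (runsAux m 1 t).Nodup :=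
        hp1.imp (fun {a b} hab => fun e => absurd (e ▸ hab) (lt_irrefl _))
      have hnd2 : (occCanon (sequences.flatMap (fun seq => seq))).Nodup :=
        hp2.imp (fun {a b} hab => fun e => absurd (e ▸ hab) (lt_irrefl _))
      exact List.eq_of_perm_of_sorted
        (fun a b _ _ h1 h2 => absurd (lt_trans h1 h2) (lt_irrefl _))
        hp1 hp2 ((List.perm_ext_iff_of_nodup hnd1 hnd2).mpr hmem)

-- A's per-value body always amounts to one counting insert
lemma occ_A_step (d : PySem.Dict Int Int) (val : Int) :
    (let d' := if ¬ (d.contains val = true) then d.insert val 0 else d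
     d'.insert val (d'.getD val 0 + 1)) = d.insert val (d.getD val 0 + 1) := by
  by_cases h : d.contains val = true
  · simp [h]
  · have hcf : d.contains val = false := by simpa using h
    have h0 : d.getD val 0 = 0 := by simp [PySem.Dict.getD_of_not_contains, hcf]
    simp [h, PySem.Dict.insert_insert_self, PySem.Dict.getD_insert, h0]

-- sorted2 by (fst, snd) is sorted by the lexicographic key
lemma sorted2_fst_snd_eq_sorted_lex (xs : List (Int × Int)) :
    PySem.List.sorted2 xs (fun p => p.1) (fun p => p.2) false
      = PySem.List.sorted xs (fun p => toLex (p.1, p.2)) false := by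
  rw [PySem.List.sorted_eq_foldl_insertBy]
  show List.foldl (fun acc x => PySem.List.insertBy
      (fun a b => decide (a.1 < b.1) || (!decide (b.1 < a.1) && decide (a.2 < b.2))) x acc) [] xs = _
  have hfn : (fun (a b : Int × Int) => decide (a.1 < b.1) || (!decide (b.1 < a.1) && decide (a.2 < b.2)))
      = (fun (a b : Int × Int) => decide (toLex (a.1, a.2) < toLex (b.1, b.2))) := by
    funext a b
    by_cases h1 : a.1 < b.1 <;> by_cases h2 : b.1 < a.1 <;> by_cases h3 : a.2 < b.2 <;>
      simp [h1, h2, h3, Prod.Lex.toLex_lt_toLex] <;> omega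
  rw [hfn]

-- A computes occCanon of the flattened input
lemma occ_A_eq_canon (sequences : List (List Int)) :
    occurences sequences = occCanon (sequences.flatMap (fun seq => seq)) := by
  unfold occurences
  have hstep : (fun (d : PySem.Dict Int Int) (val : Int) =>
      let d' := if ¬ (d.contains val = true) then d.insert val 0 else d
      d'.insert val (d'.getD val 0 + 1))
      = fun (d : PySem.Dict Int Int) (val : Int) => d.insert val (d.getD val 0 + 1) := by
    funext d val
    exact occ_A_step d val
  simp only [hstep]
  rw [← List.foldl_flatten]
  have hflat : sequences.flatten = sequences.flatMap (fun seq => seq) := by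
    simp
  rw [hflat, PySem.Dict.foldl_insert_getD_add_one_eq_counter]
  rw [sorted2_fst_snd_eq_sorted_lex]
  apply PySem.List.sorted_eq_of_perm_of_pairwise_lt
  · rw [PySem.Dict.items_counter]
    unfold occCanon
    exact (PySem.List.sorted_perm (PySem.Set.ofList (sequences.flatMap (fun seq => seq)))
      (fun x => x) false).map _
  · exact List.Pairwise.map _
      (fun a b h => Prod.Lex.toLex_lt_toLex.mpr (Or.inl h))
      (PySem.List.sorted_ofList_pairwise_lt (sequences.flatMap (fun seq => seq)))

-- ===== VERDICT (by name: the statement is the Claim_ definition above) =====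
theorem occurences_spec : Claim_equal_occurences := by
  intro sequences _
  unfold Spec_occurences
  rw [occ_A_eq_canon, occ_B_eq_canon]
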